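-- pv_equiv track=rewrite | github.com/aicodeautomation/bb-ios-automation | placement.py | find_best_placement
-- ===== SOURCE A (Python) =====
-- def can_place_shape(board, shape, board_row, board_col):
--     shape_rows, shape_cols = len(shape), len(shape[0])
--     for i in range(shape_rows):
--         for j in range(shape_cols):
--             if shape[i][j] == 1:
--                 r = board_row + i
--                 c = board_col + j
--                 if r < 0 or c < 0 or r >= len(board) or c >= len(board[0]) or board[r][c] == 1:
--                     return False
--     return True
--
-- def place_shape_on_board(board, shape, row_offset, col_offset):
--     new_board = [row[:] for row in board]
--     for i in range(len(shape)):
--         for j in range(len(shape[0])):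
--             if shape[i][j] == 1:
--                 new_board[row_offset + i][col_offset + j] = 1
--     return new_board
--
-- def count_full_lines(board):
--     full_rows = sum(all(cell == 1 for cell in row) for row in board)
--     full_cols = sum(all(board[r][c] == 1 for r in range(len(board))) for c in range(len(board[0])))
--     return full_rows + full_cols
--
-- def find_best_placement(board, shape):
--     best_score = -1
--     best_position = None
--     board_rows, board_cols = len(board), len(board[0])
--     shape_rows, shape_cols = len(shape), len(shape[0])
--
--     for i in range(board_rows - shape_rows + 1):
--         for j in range(board_cols - shape_cols + 1):
--             if can_place_shape(board, shape, i, j):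
--                 simulated = place_shape_on_board(board, shape, i, j)
--                 score = count_full_lines(simulated)
--                 if score > best_score:
--                     best_score = score
--                     best_position = (i, j)
--     return best_position, best_score
-- ===== SOURCE B (Python) =====
-- def find_best_placement(board, shape):
--     R, C = len(board), len(board[0])
--     SR, SC = len(shape), len(shape[0])
--     if R - SR + 1 <= 0 or C - SC + 1 <= 0:
--         return None, -1  # the shape does not fit on the board at all
--     row_fill = [sum(1 for x in row if x == 1) for row in board]
--     col_fill = [sum(1 for row in board if row[c] == 1) for c in range(C)]
--     add_row = [sum(1 for x in srow if x == 1) for srow in shape]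
--     add_col = [sum(1 for srow in shape if srow[b] == 1) for b in range(SC)]
--     cells = [(a, b) for a in range(SR) for b in range(SC) if shape[a][b] == 1]
--     total_full = sum(1 for f in row_fill if f == C) + sum(1 for f in col_fill if f == R)
--     best_score = -1
--     best_position = None
--     for i in range(R - SR + 1):
--         for j in range(C - SC + 1):
--             if all(board[i + a][j + b] != 1 for (a, b) in cells):
--                 score = (total_full
--                          + sum(1 for a in range(SR)
--                                if add_row[a] > 0 and row_fill[i + a] + add_row[a] == C)
--                          + sum(1 for b in range(SC)
--                                if add_col[b] > 0 and col_fill[j + b] + add_col[b] == R))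
--                 if score > best_score:
--                     best_score = score
--                     best_position = (i, j)
--     return best_position, best_score
-- ===== Notes on version B (the rewrite author's own statement) =====
-- stated objective: alternative
-- what changed: A simulates each placement by copying the whole board and rescanning every row and column; B precomputes per-row/per-column fill counts (and the shape's per-row/per-column cell counts) once and scores each placement incrementally from those counts, without building any board copy.
-- outside the precondition, e.g. on find_best_placement([[0, 1], [1, 1, 1]], [[1]]): A returns ((0, 0), 4), B returns ((0, 0), 3)
import Mathlib
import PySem

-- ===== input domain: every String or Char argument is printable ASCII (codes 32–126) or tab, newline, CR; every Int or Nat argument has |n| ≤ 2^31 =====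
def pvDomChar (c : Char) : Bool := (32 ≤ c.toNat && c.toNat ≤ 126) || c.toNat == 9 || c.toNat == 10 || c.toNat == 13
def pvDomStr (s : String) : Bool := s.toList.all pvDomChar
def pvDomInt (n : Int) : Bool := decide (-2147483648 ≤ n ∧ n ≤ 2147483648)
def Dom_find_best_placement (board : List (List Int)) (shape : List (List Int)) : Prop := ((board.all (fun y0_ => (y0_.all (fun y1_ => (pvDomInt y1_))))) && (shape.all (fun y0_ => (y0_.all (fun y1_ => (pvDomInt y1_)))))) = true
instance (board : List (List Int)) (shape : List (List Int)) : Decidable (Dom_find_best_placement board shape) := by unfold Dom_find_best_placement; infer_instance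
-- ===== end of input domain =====

-- B replaces A's per-placement board copy + full-board rescan by per-row/per-column fill counts
-- precomputed once, scoring each placement incrementally from those counts (objective: alternative).
-- ===== PORT A =====
def pvCanPlace (board : List (List Int)) (shape : List (List Int)) (board_row board_col : Int) : Bool :=
  let shape_rows : Int := shape.length
  let shape_cols : Int := (PySem.List.pyGetD shape 0 []).length
  (PySem.List.pyRange 0 shape_rows 1).all fun i =>
    (PySem.List.pyRange 0 shape_cols 1).all fun j =>
      if PySem.List.pyGetD (PySem.List.pyGetD shape i []) j 0 == 1 then
        let r := board_row + i
        let c := board_col + j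
        !(decide (r < 0) || decide (c < 0) || decide (r ≥ (board.length : Int)) ||
          decide (c ≥ ((PySem.List.pyGetD board 0 []).length : Int)) ||
          (PySem.List.pyGetD (PySem.List.pyGetD board r []) c 0 == 1))
      else true

def pvPlaceShape (board : List (List Int)) (shape : List (List Int)) (row_offset col_offset : Int) : List (List Int) :=
  (PySem.List.pyRange 0 (shape.length : Int) 1).foldl
    (fun nb i =>
      (PySem.List.pyRange 0 ((PySem.List.pyGetD shape 0 []).length : Int) 1).foldl
        (fun nb j =>
          if PySem.List.pyGetD (PySem.List.pyGetD shape i []) j 0 == 1 then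
            PySem.List.pySetD nb (row_offset + i)
              (PySem.List.pySetD (PySem.List.pyGetD nb (row_offset + i) []) (col_offset + j) (1 : Int))
          else nb)
        nb)
    board

def pvCountFullLines (board : List (List Int)) : Int :=
  let full_rows : Int :=
    (board.map (fun row => if row.all (fun cell => cell == 1) then (1 : Int) else 0)).sum
  let full_cols : Int :=
    ((PySem.List.pyRange 0 ((PySem.List.pyGetD board 0 []).length : Int) 1).map
      (fun c => if (PySem.List.pyRange 0 (board.length : Int) 1).all
                    (fun r => PySem.List.pyGetD (PySem.List.pyGetD board r []) c 0 == 1)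
                then (1 : Int) else 0)).sum
  full_rows + full_cols

def find_best_placement (board : List (List Int)) (shape : List (List Int)) : (Option (Int × Int)) × Int :=
  let board_rows : Int := board.length
  let board_cols : Int := (PySem.List.pyGetD board 0 []).length
  let shape_rows : Int := shape.length
  let shape_cols : Int := (PySem.List.pyGetD shape 0 []).length
  (PySem.List.pyRange 0 (board_rows - shape_rows + 1) 1).foldl
    (fun st i =>
      (PySem.List.pyRange 0 (board_cols - shape_cols + 1) 1).foldl
        (fun st j =>
          if pvCanPlace board shape i j then
            let simulated := pvPlaceShape board shape i j
            let score := pvCountFullLines simulated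
            if score > st.2 then (some (i, j), score) else st
          else st)
        st)
    (none, -1)

-- ===== PORT B =====
def find_best_placement_alt (board : List (List Int)) (shape : List (List Int)) : (Option (Int × Int)) × Int :=
  let R : Int := board.length
  let C : Int := (PySem.List.pyGetD board 0 []).length
  let SR : Int := shape.length
  let SC : Int := (PySem.List.pyGetD shape 0 []).length
  if R - SR + 1 ≤ 0 ∨ C - SC + 1 ≤ 0 then (none, -1) else
  let row_fill : List Int := board.map (fun row => ((row.countP (fun x => x == 1) : Nat) : Int))
  let col_fill : List Int :=
    (PySem.List.pyRange 0 C 1).map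
      (fun c => ((board.countP (fun row => PySem.List.pyGetD row c 0 == 1) : Nat) : Int))
  let add_row : List Int := shape.map (fun srow => ((srow.countP (fun x => x == 1) : Nat) : Int))
  let add_col : List Int :=
    (PySem.List.pyRange 0 SC 1).map
      (fun b => ((shape.countP (fun srow => PySem.List.pyGetD srow b 0 == 1) : Nat) : Int))
  let cells : List (Int × Int) :=
    (PySem.List.pyRange 0 SR 1).flatMap
      (fun a => ((PySem.List.pyRange 0 SC 1).filter
                   (fun b => PySem.List.pyGetD (PySem.List.pyGetD shape a []) b 0 == 1)).map
                  (fun b => (a, b)))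
  let total_full : Int :=
    ((row_fill.countP (fun f => f == C) : Nat) : Int) + ((col_fill.countP (fun f => f == R) : Nat) : Int)
  (PySem.List.pyRange 0 (R - SR + 1) 1).foldl
    (fun st i =>
      (PySem.List.pyRange 0 (C - SC + 1) 1).foldl
        (fun st j =>
          if cells.all (fun ab =>
               !(PySem.List.pyGetD (PySem.List.pyGetD board (i + ab.1) []) (j + ab.2) 0 == 1)) then
            let score : Int := total_full
              + (((PySem.List.pyRange 0 SR 1).countP
                   (fun a => decide (PySem.List.pyGetD add_row a 0 > 0) &&
                             (PySem.List.pyGetD row_fill (i + a) 0 + PySem.List.pyGetD add_row a 0 == C)) : Nat) : Int)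
              + (((PySem.List.pyRange 0 SC 1).countP
                   (fun b => decide (PySem.List.pyGetD add_col b 0 > 0) &&
                             (PySem.List.pyGetD col_fill (j + b) 0 + PySem.List.pyGetD add_col b 0 == R)) : Nat) : Int)
            if score > st.2 then (some (i, j), score) else st
          else st)
        st)
    (none, -1)

-- ===== PRECONDITION & SPEC =====
-- Pre_ excludes the empty board/shape (A raises IndexError on board[0]/shape[0]) and, when at
-- least one placement position exists, ragged boards/shapes, on which A may raise IndexError or
-- count cells lying beyond column len(board[0]) that no placement can ever touch.
def Pre_find_best_placement (board : List (List Int)) (shape : List (List Int)) : Prop :=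
  board ≠ [] ∧ shape ≠ [] ∧
  (board.length < shape.length ∨ (board.headD []).length < (shape.headD []).length ∨
    ((∀ row ∈ board, row.length = (board.headD []).length) ∧
     (∀ srow ∈ shape, srow.length = (shape.headD []).length)))
instance (board : List (List Int)) (shape : List (List Int)) : Decidable (Pre_find_best_placement board shape) := by unfold Pre_find_best_placement; infer_instance
def pvWitness_find_best_placement : List (List Int) × List (List Int) := ([[0, 1], [1, 0]], [[1]])

def Spec_find_best_placement (board : List (List Int)) (shape : List (List Int)) (out : (Option (Int × Int)) × Int) : Prop := out = find_best_placement_alt board shape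
instance (board : List (List Int)) (shape : List (List Int)) (out : (Option (Int × Int)) × Int) : Decidable (Spec_find_best_placement board shape out) := by unfold Spec_find_best_placement; infer_instance

-- ===== CLAIM (what is proved, stated in full; the proofs are below) =====
def Claim_equal_find_best_placement : Prop := ∀ (board : List (List Int)) (shape : List (List Int)), Dom_find_best_placement board shape → Pre_find_best_placement board shape → Spec_find_best_placement board shape (find_best_placement board shape)

-- ===== LEMMAS AND PROOFS =====

def pvAt (bd : List (List Int)) (r c : Nat) : Int := (bd.getD r []).getD c 0
def pvShapeAt (shape : List (List Int)) (a b : Nat) : Int := (shape.getD a []).getD b 0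
def pvSet2 (nb : List (List Int)) (r c : Nat) : List (List Int) := nb.set r ((nb.getD r []).set c 1)

theorem pv_map_getD_range {α : Type} (l : List α) (d : α) :
    (List.range l.length).map (fun k => l.getD k d) = l := by
  apply List.ext_getElem
  · simp
  · intro i h1 h2
    simp [List.getElem?_eq_getElem h2]

theorem pv_countP_getD_range {α : Type} (l : List α) (p : α → Bool) (d : α) :
    l.countP p = (List.range l.length).countP (fun k => p (l.getD k d)) := by
  conv_lhs => rw [← pv_map_getD_range l d]
  rw [List.countP_map]; rfl

theorem pv_all_getD_range {α : Type} (l : List α) (p : α → Bool) (d : α) :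
    l.all p = (List.range l.length).all (fun k => p (l.getD k d)) := by
  conv_lhs => rw [← pv_map_getD_range l d]
  rw [List.all_map]; rfl

theorem pv_countP_congr {α : Type} (l : List α) (p q : α → Bool)
    (h : ∀ x ∈ l, p x = q x) : l.countP p = l.countP q := by
  induction l with
  | nil => rfl
  | cons x t ih =>
    simp only [List.countP_cons, h x List.mem_cons_self,
      ih (fun y hy => h y (List.mem_cons_of_mem x hy))]

theorem pv_countP_split {α : Type} (l : List α) (p q s : α → Bool)
    (h : ∀ x ∈ l, p x = (q x || s x) ∧ ¬(q x = true ∧ s x = true)) :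
    l.countP p = l.countP q + l.countP s := by
  induction l with
  | nil => rfl
  | cons x t ih =>
    have hx := h x List.mem_cons_self
    have ht := ih (fun y hy => h y (List.mem_cons_of_mem x hy))
    simp only [List.countP_cons, hx.1]
    cases hq : q x <;> cases hs : s x <;> simp_all <;> omega

theorem pv_getD_map {α β : Type} (l : List α) (f : α → β) (n : Nat) (d : β) (d' : α)
    (h : n < l.length) : (l.map f).getD n d = f (l.getD n d') := by
  rw [List.getD_eq_getElem _ _ (by simpa using h), List.getD_eq_getElem _ _ h, List.getElem_map]

theorem pv_getD_set1 {α : Type} (l : List α) (d : α) (i : Nat) (v : α) (n : Nat) :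
    (l.set i v).getD n d = if n = i ∧ i < l.length then v else l.getD n d := by
  simp only [List.getD, List.getElem?_set]
  by_cases h : i = n
  · subst h
    by_cases h2 : i < l.length <;> simp [h2]
  · have h' : ¬ n = i := fun hh => h hh.symm
    simp [h, h']

theorem pvSet2_length (nb : List (List Int)) (r c : Nat) :
    (pvSet2 nb r c).length = nb.length := by simp [pvSet2]

theorem pvSet2_rowlen (nb : List (List Int)) (r c : Nat) (r' : Nat) :
    ((pvSet2 nb r c).getD r' []).length = (nb.getD r' []).length := by
  rw [pvSet2, pv_getD_set1]
  split
  · rename_i h; rw [h.1]; simp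
  · rfl

theorem pvSet2_at (nb : List (List Int)) (r c : Nat)
    (hr : r < nb.length) (hc : c < (nb.getD r []).length) (r' c' : Nat) :
    pvAt (pvSet2 nb r c) r' c' = if r' = r ∧ c' = c then 1 else pvAt nb r' c' := by
  unfold pvAt pvSet2
  rw [pv_getD_set1]
  by_cases h : r' = r
  · subst h
    rw [if_pos ⟨rfl, hr⟩, pv_getD_set1]
    by_cases h2 : c' = c
    · subst h2
      rw [if_pos ⟨rfl, hc⟩, if_pos ⟨rfl, rfl⟩]
    · rw [if_neg (by tauto), if_neg (by tauto)]
  · rw [if_neg (by tauto), if_neg (by tauto)]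

def pvStepB (shape : List (List Int)) (iN jN a : Nat) (nb : List (List Int)) (b : Nat) : List (List Int) :=
  if pvShapeAt shape a b == 1 then pvSet2 nb (iN + a) (jN + b) else nb

def pvInnerF (shape : List (List Int)) (iN jN : Nat) (nb : List (List Int)) (a : Nat) : List (List Int) :=
  (List.range (shape.getD 0 []).length).foldl (pvStepB shape iN jN a) nb

def pvPlaceN (board shape : List (List Int)) (iN jN : Nat) : List (List Int) :=
  (List.range shape.length).foldl (pvInnerF shape iN jN) board

theorem pv_fold_dims {β : Type} (step : List (List Int) → β → List (List Int))
    (hstep : ∀ nb b, (step nb b).length = nb.length ∧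
      ∀ r', ((step nb b).getD r' []).length = ((nb.getD r' []) : List Int).length)
    (l : List β) : ∀ (nb : List (List Int)),
    ((l.foldl step nb).length = nb.length) ∧
      ∀ r', ((l.foldl step nb).getD r' []).length = (nb.getD r' []).length := by
  induction l with
  | nil => intro nb; simp
  | cons x t ih =>
    intro nb
    simp only [List.foldl_cons]
    refine ⟨?_, ?_⟩
    · rw [(ih (step nb x)).1, (hstep nb x).1]
    · intro r'; rw [(ih (step nb x)).2 r', (hstep nb x).2 r']

theorem pvStepB_dims (shape : List (List Int)) (iN jN a : Nat) :
    ∀ nb b, (pvStepB shape iN jN a nb b).length = nb.length ∧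
      ∀ r', ((pvStepB shape iN jN a nb b).getD r' []).length = (nb.getD r' []).length := by
  intro nb b
  unfold pvStepB
  split
  · exact ⟨pvSet2_length nb _ _, pvSet2_rowlen nb _ _⟩
  · exact ⟨rfl, fun _ => rfl⟩

theorem pvInnerF_dims (shape : List (List Int)) (iN jN : Nat) :
    ∀ nb a, (pvInnerF shape iN jN nb a).length = nb.length ∧
      ∀ r', ((pvInnerF shape iN jN nb a).getD r' []).length = (nb.getD r' []).length := by
  intro nb a
  exact pv_fold_dims _ (pvStepB_dims shape iN jN a) _ nb

theorem pvPlaceN_dims (board shape : List (List Int)) (iN jN : Nat) :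
    (pvPlaceN board shape iN jN).length = board.length ∧
      ∀ r', ((pvPlaceN board shape iN jN).getD r' []).length = (board.getD r' []).length :=
  pv_fold_dims _ (pvInnerF_dims shape iN jN) _ board

theorem pv_innerfold_at (shape : List (List Int)) (iN jN a : Nat) (n : Nat)
    (nb : List (List Int)) (hr : iN + a < nb.length)
    (hb : ∀ b, b < n → jN + b < (nb.getD (iN + a) []).length) (r' c' : Nat) :
    pvAt ((List.range n).foldl (pvStepB shape iN jN a) nb) r' c'
      = if r' = iN + a ∧ (∃ b, b < n ∧ c' = jN + b ∧ pvShapeAt shape a b = 1) then 1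
        else pvAt nb r' c' := by
  induction n with
  | zero => simp
  | succ n ih =>
    rw [List.range_succ, List.foldl_append, List.foldl_cons, List.foldl_nil]
    have hdims := pv_fold_dims _ (pvStepB_dims shape iN jN a) (List.range n) nb
    rw [show (pvStepB shape iN jN a ((List.range n).foldl (pvStepB shape iN jN a) nb) n)
        = if pvShapeAt shape a n == 1 then
            pvSet2 ((List.range n).foldl (pvStepB shape iN jN a) nb) (iN + a) (jN + n)
          else (List.range n).foldl (pvStepB shape iN jN a) nb from rfl]
    by_cases hcell : pvShapeAt shape a n = 1
    · rw [if_pos (by simpa using hcell)]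
      rw [pvSet2_at _ _ _ (by rw [hdims.1]; exact hr)
        (by rw [hdims.2]; exact hb n (by omega)) r' c']
      rw [ih (fun b hb' => hb b (by omega))]
      by_cases h1 : r' = iN + a ∧ c' = jN + n
      · rw [if_pos h1, if_pos ⟨h1.1, n, by omega, h1.2, hcell⟩]
      · rw [if_neg h1]
        apply if_congr _ rfl rfl
        constructor
        · rintro ⟨hra, b, hbn, hcb, hsb⟩; exact ⟨hra, b, by omega, hcb, hsb⟩
        · rintro ⟨hra, b, hbn, hcb, hsb⟩
          refine ⟨hra, b, ?_, hcb, hsb⟩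
          rcases Nat.lt_succ_iff_lt_or_eq.mp hbn with h | h
          · exact h
          · exact absurd ⟨hra, by omega⟩ h1
    · rw [if_neg (by simpa using hcell)]
      rw [ih (fun b hb' => hb b (by omega))]
      apply if_congr _ rfl rfl
      constructor
      · rintro ⟨hra, b, hbn, hcb, hsb⟩; exact ⟨hra, b, by omega, hcb, hsb⟩
      · rintro ⟨hra, b, hbn, hcb, hsb⟩
        refine ⟨hra, b, ?_, hcb, hsb⟩
        rcases Nat.lt_succ_iff_lt_or_eq.mp hbn with h | h
        · exact h
        · subst h; exact absurd hsb hcell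

theorem pv_placefold_at (board shape : List (List Int)) (iN jN : Nat) (CC : Nat)
    (hrows : ∀ r' , r' < board.length → (board.getD r' []).length = CC)
    (hj : jN + (shape.getD 0 []).length ≤ CC) :
    ∀ (m : Nat), iN + m ≤ board.length → ∀ r' c',
    pvAt ((List.range m).foldl (pvInnerF shape iN jN) board) r' c'
      = if ∃ a, a < m ∧ r' = iN + a ∧
            (∃ b, b < (shape.getD 0 []).length ∧ c' = jN + b ∧ pvShapeAt shape a b = 1)
        then 1 else pvAt board r' c' := by
  intro m
  induction m with
  | zero => simp
  | succ m ih =>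
    intro hm r' c'
    rw [List.range_succ, List.foldl_append, List.foldl_cons, List.foldl_nil]
    have hdims := pv_fold_dims _ (pvInnerF_dims shape iN jN) (List.range m) board
    rw [show (pvInnerF shape iN jN ((List.range m).foldl (pvInnerF shape iN jN) board) m)
        = (List.range (shape.getD 0 []).length).foldl (pvStepB shape iN jN m)
            ((List.range m).foldl (pvInnerF shape iN jN) board) from rfl]
    rw [pv_innerfold_at shape iN jN m _ _
      (by rw [hdims.1]; omega)
      (by intro b hblt
          rw [hdims.2]
          rw [hrows (iN + m) (by omega)]
          omega) r' c']
    rw [ih (by omega) r' c']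
    by_cases h1 : r' = iN + m ∧ ∃ b, b < (shape.getD 0 []).length ∧ c' = jN + b ∧ pvShapeAt shape m b = 1
    · rw [if_pos h1]
      obtain ⟨hra, b, hb1, hb2, hb3⟩ := h1
      rw [if_pos ⟨m, by omega, hra, b, hb1, hb2, hb3⟩]
    · rw [if_neg h1]
      apply if_congr _ rfl rfl
      constructor
      · rintro ⟨a, ham, rest⟩; exact ⟨a, by omega, rest⟩
      · rintro ⟨a, ham, hra, hb⟩
        rcases Nat.lt_succ_iff_lt_or_eq.mp ham with h | h
        · exact ⟨a, h, hra, hb⟩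
        · subst h; exact absurd ⟨hra, hb⟩ h1

theorem pvPlaceN_at (board shape : List (List Int)) (iN jN : Nat) (CC : Nat)
    (hrows : ∀ r', r' < board.length → (board.getD r' []).length = CC)
    (hi : iN + shape.length ≤ board.length)
    (hj : jN + (shape.getD 0 []).length ≤ CC) (r' c' : Nat) :
    pvAt (pvPlaceN board shape iN jN) r' c'
      = if ∃ a, a < shape.length ∧ r' = iN + a ∧
            (∃ b, b < (shape.getD 0 []).length ∧ c' = jN + b ∧ pvShapeAt shape a b = 1)
        then 1 else pvAt board r' c' :=
  pv_placefold_at board shape iN jN CC hrows hj shape.length hi r' c'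

theorem pv_countP_window (C jN SC : Nat) (hj : jN + SC ≤ C) (p : Nat → Bool) :
    (List.range C).countP (fun c => decide (∃ b, b < SC ∧ c = jN + b ∧ p b = true))
      = (List.range SC).countP p := by
  have hC : C = jN + (SC + (C - jN - SC)) := by omega
  rw [hC]
  simp only [List.range_add, List.countP_append, List.countP_map]
  have h1 : (List.range jN).countP (fun c => decide (∃ b, b < SC ∧ c = jN + b ∧ p b = true)) = 0 := by
    rw [List.countP_eq_zero]
    intro c hc
    simp only [List.mem_range] at hc
    simp only [decide_eq_true_eq]
    rintro ⟨b, _, hcb, _⟩; omega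
  have h3 : (List.range (C - jN - SC)).countP
      (((fun c => decide (∃ b, b < SC ∧ c = jN + b ∧ p b = true)) ∘ (jN + ·)) ∘ (SC + ·)) = 0 := by
    rw [List.countP_eq_zero]
    intro x hx
    simp only [Function.comp_apply, decide_eq_true_eq]
    rintro ⟨b, hb, hcb, _⟩; omega
  have h2 : (List.range SC).countP ((fun c => decide (∃ b, b < SC ∧ c = jN + b ∧ p b = true)) ∘ (jN + ·))
      = (List.range SC).countP p := by
    apply pv_countP_congr
    intro b0 hb0
    simp only [List.mem_range] at hb0
    simp only [Function.comp_apply]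
    by_cases hp : p b0 = true
    · simp only [hp]
      exact decide_eq_true ⟨b0, hb0, rfl, hp⟩
    · simp only [Bool.not_eq_true] at hp
      simp only [hp]
      apply decide_eq_false
      rintro ⟨b, _, hcb, hpb⟩
      have : b = b0 := by omega
      subst this
      rw [hpb] at hp; cases hp
  omega

theorem pv_count_full_shift (N S off cap : Nat) (hoff : off + S ≤ N)
    (full : Nat → Bool) (fill add : Nat → Nat)
    (h1 : ∀ r, r < N → (r < off ∨ off + S ≤ r) → full r = (fill r == cap))
    (h2 : ∀ a, a < S → add a = 0 → full (off + a) = (fill (off + a) == cap))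
    (h3 : ∀ a, a < S → 0 < add a →
      full (off + a) = (fill (off + a) + add a == cap) ∧ fill (off + a) ≠ cap) :
    (List.range N).countP full
      = (List.range N).countP (fun r => fill r == cap)
        + (List.range S).countP (fun a => decide (0 < add a) && (fill (off + a) + add a == cap)) := by
  have hN : N = off + (S + (N - off - S)) := by omega
  rw [hN]
  simp only [List.range_add, List.countP_append, List.countP_map]
  have e1 : (List.range off).countP full = (List.range off).countP (fun r => fill r == cap) := by
    apply pv_countP_congr
    intro r hr
    simp only [List.mem_range] at hr
    exact h1 r (by omega) (by omega)
  have e3 : (List.range (N - off - S)).countP ((full ∘ (off + ·)) ∘ (S + ·))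
      = (List.range (N - off - S)).countP (((fun r => fill r == cap) ∘ (off + ·)) ∘ (S + ·)) := by
    apply pv_countP_congr
    intro x hx
    simp only [List.mem_range] at hx
    simp only [Function.comp_apply]
    exact h1 (off + (S + x)) (by omega) (by omega)
  have e2 : (List.range S).countP (full ∘ (off + ·))
      = (List.range S).countP ((fun r => fill r == cap) ∘ (off + ·))
        + (List.range S).countP (fun a => decide (0 < add a) && (fill (off + a) + add a == cap)) := by
    apply pv_countP_split
    intro a ha
    simp only [List.mem_range] at ha
    simp only [Function.comp_apply]
    rcases Nat.eq_zero_or_pos (add a) with hz | hpos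
    · have := h2 a ha hz
      rw [this, hz]
      constructor
      · simp
      · rintro ⟨_, hb⟩
        simp at hb
    · obtain ⟨hfull, hne⟩ := h3 a ha hpos
      rw [hfull]
      have hq : (fill (off + a) == cap) = false := by
        simp [hne]
      rw [hq]
      constructor
      · simp [hpos]
      · rintro ⟨hb, _⟩; cases hb
  omega

def pvFillR (board : List (List Int)) (r : Nat) : Nat := (board.getD r []).countP (fun x => x == 1)
def pvFillC (board : List (List Int)) (c : Nat) : Nat := board.countP (fun row => row.getD c 0 == 1)
def pvAddR (shape : List (List Int)) (a : Nat) : Nat := (shape.getD a []).countP (fun x => x == 1)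
def pvAddC (shape : List (List Int)) (b : Nat) : Nat := shape.countP (fun srow => srow.getD b 0 == 1)

theorem pvFillR_range (board : List (List Int)) (CC : Nat)
    (hrows : ∀ r', r' < board.length → (board.getD r' []).length = CC)
    (r : Nat) (hr : r < board.length) :
    pvFillR board r = (List.range CC).countP (fun c => pvAt board r c == 1) := by
  rw [pvFillR, pv_countP_getD_range _ _ 0, hrows r hr]
  rfl

theorem pvFillC_range (board : List (List Int)) (c : Nat) :
    pvFillC board c = (List.range board.length).countP (fun r => pvAt board r c == 1) := by
  rw [pvFillC, pv_countP_getD_range _ _ []]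
  rfl

theorem pvAddR_range (shape : List (List Int)) (SCn : Nat)
    (hsrows : ∀ a, a < shape.length → (shape.getD a []).length = SCn)
    (a : Nat) (ha : a < shape.length) :
    pvAddR shape a = (List.range SCn).countP (fun b => pvShapeAt shape a b == 1) := by
  rw [pvAddR, pv_countP_getD_range _ _ 0, hsrows a ha]
  rfl

theorem pvAddC_range (shape : List (List Int)) (b : Nat) :
    pvAddC shape b = (List.range shape.length).countP (fun a => pvShapeAt shape a b == 1) := by
  rw [pvAddC, pv_countP_getD_range _ _ []]
  rfl

theorem pv_all_iff_fillR (board : List (List Int)) (CC : Nat)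
    (hrows : ∀ r', r' < board.length → (board.getD r' []).length = CC)
    (r : Nat) (hr : r < board.length) :
    (((List.range CC).all (fun c => pvAt board r c == 1)) = true) ↔ pvFillR board r = CC := by
  rw [pvFillR_range board CC hrows r hr]
  rw [List.all_eq_true]
  constructor
  · intro h
    calc List.countP (fun c => pvAt board r c == 1) (List.range CC)
        = (List.range CC).length := List.countP_eq_length.mpr h
      _ = CC := List.length_range ..
  · intro h c hc
    refine (List.countP_eq_length (p := fun c => pvAt board r c == 1)).mp ?_ c hc
    rw [List.length_range]
    exact h

theorem pv_all_iff_fillC (board : List (List Int)) (c : Nat) :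
    (((List.range board.length).all (fun r => pvAt board r c == 1)) = true) ↔
      pvFillC board c = board.length := by
  rw [pvFillC_range board c]
  rw [List.all_eq_true]
  constructor
  · intro h
    calc List.countP (fun r => pvAt board r c == 1) (List.range board.length)
        = (List.range board.length).length := List.countP_eq_length.mpr h
      _ = board.length := List.length_range ..
  · intro h r hrr
    refine (List.countP_eq_length (p := fun r => pvAt board r c == 1)).mp ?_ r hrr
    rw [List.length_range]
    exact h

theorem pv_rows_after (board shape : List (List Int)) (iN jN : Nat) (CC : Nat)
    (hrows : ∀ r', r' < board.length → (board.getD r' []).length = CC)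
    (hsrows : ∀ a, a < shape.length → (shape.getD a []).length = (shape.getD 0 []).length)
    (hi : iN + shape.length ≤ board.length)
    (hj : jN + (shape.getD 0 []).length ≤ CC)
    (hfit : ∀ a, a < shape.length → ∀ b, b < (shape.getD 0 []).length →
      pvShapeAt shape a b = 1 → ¬ pvAt board (iN + a) (jN + b) = 1) :
    (List.range board.length).countP
        (fun r => (List.range CC).all (fun c => pvAt (pvPlaceN board shape iN jN) r c == 1))
      = (List.range board.length).countP (fun r => pvFillR board r == CC)
        + (List.range shape.length).countP
            (fun a => decide (0 < pvAddR shape a) && (pvFillR board (iN + a) + pvAddR shape a == CC)) := by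
  apply pv_count_full_shift board.length shape.length iN CC hi _ (pvFillR board) (pvAddR shape)
  · -- h1 : outside the window rows are unchanged
    intro r hr hout
    have hsim : ∀ c, pvAt (pvPlaceN board shape iN jN) r c = pvAt board r c := by
      intro c
      rw [pvPlaceN_at board shape iN jN CC hrows hi hj r c, if_neg]
      rintro ⟨a, ha, hra, -⟩
      omega
    simp only [hsim]
    apply Bool.coe_iff_coe.mp
    rw [beq_iff_eq]
    exact pv_all_iff_fillR board CC hrows r hr
  · -- h2 : rows in the window not touched by the shape
    intro a ha hz
    have hnone : ∀ b, b < (shape.getD 0 []).length → pvShapeAt shape a b ≠ 1 := by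
      intro b hb
      rw [pvAddR_range shape _ hsrows a ha] at hz
      have := List.countP_eq_zero.mp hz b (List.mem_range.mpr hb)
      simpa using this
    have hsim : ∀ c, pvAt (pvPlaceN board shape iN jN) (iN + a) c = pvAt board (iN + a) c := by
      intro c
      rw [pvPlaceN_at board shape iN jN CC hrows hi hj _ c, if_neg]
      rintro ⟨a', ha', heq, b, hb, -, hcell⟩
      have : a' = a := by omega
      subst this
      exact hnone b hb hcell
    simp only [hsim]
    apply Bool.coe_iff_coe.mp
    rw [beq_iff_eq]
    exact pv_all_iff_fillR board CC hrows _ (by omega)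
  · -- h3 : rows touched by the shape
    intro a ha hpos
    have hex : ∃ b, b < (shape.getD 0 []).length ∧ pvShapeAt shape a b = 1 := by
      rw [pvAddR_range shape _ hsrows a ha] at hpos
      obtain ⟨b, hb, hpb⟩ := List.countP_pos_iff.mp hpos
      exact ⟨b, List.mem_range.mp hb, by simpa using hpb⟩
    obtain ⟨b0, hb0, hcell0⟩ := hex
    have hne : pvFillR board (iN + a) ≠ CC := by
      intro hfc
      have hall := (pv_all_iff_fillR board CC hrows (iN + a) (by omega)).mpr hfc
      rw [List.all_eq_true] at hall
      have := hall (jN + b0) (List.mem_range.mpr (by omega))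
      exact hfit a ha b0 hb0 hcell0 (by simpa using this)
    refine ⟨?_, hne⟩
    have hsim2 : ∀ c, (pvAt (pvPlaceN board shape iN jN) (iN + a) c == 1)
        = (decide (∃ b, b < (shape.getD 0 []).length ∧ c = jN + b ∧ pvShapeAt shape a b = 1)
            || (pvAt board (iN + a) c == 1)) := by
      intro c
      rw [pvPlaceN_at board shape iN jN CC hrows hi hj _ c]
      by_cases hone : ∃ b, b < (shape.getD 0 []).length ∧ c = jN + b ∧ pvShapeAt shape a b = 1
      · rw [if_pos ⟨a, ha, rfl, hone⟩, decide_eq_true hone]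
        simp
      · rw [if_neg]
        · rw [decide_eq_false hone]
          simp
        · rintro ⟨a', ha', heq, b, hb, hcb, hcell⟩
          have : a' = a := by omega
          subst this
          exact hone ⟨b, hb, hcb, hcell⟩
    simp only [hsim2]
    apply Bool.coe_iff_coe.mp
    rw [beq_iff_eq]
    have hsplit : (List.range CC).countP
        (fun c => decide (∃ b, b < (shape.getD 0 []).length ∧ c = jN + b ∧ pvShapeAt shape a b = 1)
            || (pvAt board (iN + a) c == 1))
        = pvAddR shape a + pvFillR board (iN + a) := by
      rw [pv_countP_split _ _
        (fun c => decide (∃ b, b < (shape.getD 0 []).length ∧ c = jN + b ∧ pvShapeAt shape a b = 1))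
        (fun c => pvAt board (iN + a) c == 1) (fun c hc => ⟨rfl, ?_⟩)]
      · congr 1
        · rw [show (List.range CC).countP
              (fun c => decide (∃ b, b < (shape.getD 0 []).length ∧ c = jN + b ∧ pvShapeAt shape a b = 1))
              = (List.range CC).countP
              (fun c => decide (∃ b, b < (shape.getD 0 []).length ∧ c = jN + b ∧
                  (pvShapeAt shape a b == 1) = true)) from
            pv_countP_congr _ _ _ (fun c _ => by simp)]
          rw [pv_countP_window CC jN (shape.getD 0 []).length hj (fun b => pvShapeAt shape a b == 1)]
          exact (pvAddR_range shape _ hsrows a ha).symm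
        · exact (pvFillR_range board CC hrows (iN + a) (by omega)).symm
      · rintro ⟨hone, hb1⟩
        rw [decide_eq_true_eq] at hone
        obtain ⟨b, hb, hcb, hcell⟩ := hone
        subst hcb
        exact hfit a ha b hb hcell (by simpa using hb1)
    constructor
    · intro hall
      have hcnt : (List.range CC).countP
          (fun c => decide (∃ b, b < (shape.getD 0 []).length ∧ c = jN + b ∧ pvShapeAt shape a b = 1)
              || (pvAt board (iN + a) c == 1)) = CC := by
        calc _ = (List.range CC).length := List.countP_eq_length.mpr (List.all_eq_true.mp hall)
          _ = CC := List.length_range ..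
      rw [hsplit] at hcnt
      omega
    · intro hsum
      rw [List.all_eq_true]
      refine (List.countP_eq_length (p := fun c =>
        decide (∃ b, b < (shape.getD 0 []).length ∧ c = jN + b ∧ pvShapeAt shape a b = 1)
          || (pvAt board (iN + a) c == 1))).mp ?_
      rw [List.length_range, hsplit]
      omega

theorem pv_cols_after (board shape : List (List Int)) (iN jN : Nat) (CC : Nat)
    (hrows : ∀ r', r' < board.length → (board.getD r' []).length = CC)
    (hi : iN + shape.length ≤ board.length)
    (hj : jN + (shape.getD 0 []).length ≤ CC)
    (hfit : ∀ a, a < shape.length → ∀ b, b < (shape.getD 0 []).length →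
      pvShapeAt shape a b = 1 → ¬ pvAt board (iN + a) (jN + b) = 1) :
    (List.range CC).countP
        (fun c => (List.range board.length).all (fun r => pvAt (pvPlaceN board shape iN jN) r c == 1))
      = (List.range CC).countP (fun c => pvFillC board c == board.length)
        + (List.range (shape.getD 0 []).length).countP
            (fun b => decide (0 < pvAddC shape b) && (pvFillC board (jN + b) + pvAddC shape b == board.length)) := by
  apply pv_count_full_shift CC (shape.getD 0 []).length jN board.length hj _ (pvFillC board) (pvAddC shape)
  · -- h1 : columns outside the window are unchanged
    intro c hc hout
    have hsim : ∀ r, pvAt (pvPlaceN board shape iN jN) r c = pvAt board r c := by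
      intro r
      rw [pvPlaceN_at board shape iN jN CC hrows hi hj r c, if_neg]
      rintro ⟨a, ha, hra, b, hb, hcb, -⟩
      omega
    simp only [hsim]
    apply Bool.coe_iff_coe.mp
    rw [beq_iff_eq]
    exact pv_all_iff_fillC board c
  · -- h2 : window columns not touched by the shape
    intro b hb hz
    have hnone : ∀ a, a < shape.length → pvShapeAt shape a b ≠ 1 := by
      intro a ha
      rw [pvAddC_range shape b] at hz
      have := List.countP_eq_zero.mp hz a (List.mem_range.mpr ha)
      simpa using this
    have hsim : ∀ r, pvAt (pvPlaceN board shape iN jN) r (jN + b) = pvAt board r (jN + b) := by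
      intro r
      rw [pvPlaceN_at board shape iN jN CC hrows hi hj r _, if_neg]
      rintro ⟨a, ha, hra, b', hb', hcb, hcell⟩
      have : b' = b := by omega
      subst this
      exact hnone a ha hcell
    simp only [hsim]
    apply Bool.coe_iff_coe.mp
    rw [beq_iff_eq]
    exact pv_all_iff_fillC board _
  · -- h3 : window columns touched by the shape
    intro b hb hpos
    have hex : ∃ a, a < shape.length ∧ pvShapeAt shape a b = 1 := by
      rw [pvAddC_range shape b] at hpos
      obtain ⟨a, ha, hpa⟩ := List.countP_pos_iff.mp hpos
      exact ⟨a, List.mem_range.mp ha, by simpa using hpa⟩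
    obtain ⟨a0, ha0, hcell0⟩ := hex
    have hne : pvFillC board (jN + b) ≠ board.length := by
      intro hfc
      have hall := (pv_all_iff_fillC board (jN + b)).mpr hfc
      rw [List.all_eq_true] at hall
      have := hall (iN + a0) (List.mem_range.mpr (by omega))
      exact hfit a0 ha0 b hb hcell0 (by simpa using this)
    refine ⟨?_, hne⟩
    have hsim2 : ∀ r, (pvAt (pvPlaceN board shape iN jN) r (jN + b) == 1)
        = (decide (∃ a, a < shape.length ∧ r = iN + a ∧ pvShapeAt shape a b = 1)
            || (pvAt board r (jN + b) == 1)) := by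
      intro r
      rw [pvPlaceN_at board shape iN jN CC hrows hi hj r _]
      by_cases hone : ∃ a, a < shape.length ∧ r = iN + a ∧ pvShapeAt shape a b = 1
      · obtain ⟨a, ha, hra, hcell⟩ := hone
        rw [if_pos ⟨a, ha, hra, b, hb, rfl, hcell⟩, decide_eq_true ⟨a, ha, hra, hcell⟩]
        simp
      · rw [if_neg]
        · rw [decide_eq_false hone]
          simp
        · rintro ⟨a, ha, hra, b', hb', hcb, hcell⟩
          have : b' = b := by omega
          subst this
          exact hone ⟨a, ha, hra, hcell⟩
    simp only [hsim2]
    apply Bool.coe_iff_coe.mp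
    rw [beq_iff_eq]
    have hsplit : (List.range board.length).countP
        (fun r => decide (∃ a, a < shape.length ∧ r = iN + a ∧ pvShapeAt shape a b = 1)
            || (pvAt board r (jN + b) == 1))
        = pvAddC shape b + pvFillC board (jN + b) := by
      rw [pv_countP_split _ _
        (fun r => decide (∃ a, a < shape.length ∧ r = iN + a ∧ pvShapeAt shape a b = 1))
        (fun r => pvAt board r (jN + b) == 1) (fun r hr => ⟨rfl, ?_⟩)]
      · congr 1
        · rw [show (List.range board.length).countP
              (fun r => decide (∃ a, a < shape.length ∧ r = iN + a ∧ pvShapeAt shape a b = 1))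
              = (List.range board.length).countP
              (fun r => decide (∃ a, a < shape.length ∧ r = iN + a ∧
                  (pvShapeAt shape a b == 1) = true)) from
            pv_countP_congr _ _ _ (fun r _ => by simp)]
          rw [pv_countP_window board.length iN shape.length hi (fun a => pvShapeAt shape a b == 1)]
          exact (pvAddC_range shape b).symm
        · exact (pvFillC_range board (jN + b)).symm
      · rintro ⟨hone, hb1⟩
        rw [decide_eq_true_eq] at hone
        obtain ⟨a, ha, hra, hcell⟩ := hone
        subst hra
        exact hfit a ha b hb hcell (by simpa using hb1)
    constructor
    · intro hall
      have hcnt : (List.range board.length).countP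
          (fun r => decide (∃ a, a < shape.length ∧ r = iN + a ∧ pvShapeAt shape a b = 1)
              || (pvAt board r (jN + b) == 1)) = board.length := by
        calc _ = (List.range board.length).length := List.countP_eq_length.mpr (List.all_eq_true.mp hall)
          _ = board.length := List.length_range ..
      rw [hsplit] at hcnt
      omega
    · intro hsum
      rw [List.all_eq_true]
      refine (List.countP_eq_length (p := fun r =>
        decide (∃ a, a < shape.length ∧ r = iN + a ∧ pvShapeAt shape a b = 1)
          || (pvAt board r (jN + b) == 1))).mp ?_
      rw [List.length_range, hsplit]
      omega

theorem pv_fitA_iff (board shape : List (List Int)) (iN jN : Nat)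
    (hi : iN + shape.length ≤ board.length)
    (hj : jN + (shape.getD 0 []).length ≤ (board.getD 0 []).length) :
    (pvCanPlace board shape (iN : Int) (jN : Int) = true) ↔
      (∀ a, a < shape.length → ∀ b, b < (shape.getD 0 []).length →
        pvShapeAt shape a b = 1 → ¬ pvAt board (iN + a) (jN + b) = 1) := by
  unfold pvCanPlace
  simp only [PySem.List.pyGetD_zero, PySem.List.pyRange_zero_natCast, List.all_map,
    Function.comp_def, List.all_eq_true, List.mem_range]
  constructor
  · intro h a ha b hb hcell hat
    have := h a ha b hb
    rw [if_pos] at this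
    · simp only [Bool.not_eq_eq_eq_not, Bool.not_true, Bool.or_eq_false_iff] at this
      apply absurd this.2
      simp only [Bool.not_eq_false, beq_iff_eq]
      have e1 : ((iN : Int) + (a : Int)) = ((iN + a : Nat) : Int) := by push_cast; ring
      have e2 : ((jN : Int) + (b : Int)) = ((jN + b : Nat) : Int) := by push_cast; ring
      rw [e1, e2, PySem.List.pyGetD_natCast, PySem.List.pyGetD_natCast]
      exact hat
    · simp only [PySem.List.pyGetD_natCast, beq_iff_eq]
      exact hcell
  · intro h a ha b hb
    by_cases hcell : pvShapeAt shape a b = 1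
    · rw [if_pos]
      · have e1 : ((iN : Int) + (a : Int)) = ((iN + a : Nat) : Int) := by push_cast; ring
        have e2 : ((jN : Int) + (b : Int)) = ((jN + b : Nat) : Int) := by push_cast; ring
        rw [e1, e2, PySem.List.pyGetD_natCast, PySem.List.pyGetD_natCast]
        simp only [Bool.not_eq_eq_eq_not, Bool.not_true, Bool.or_eq_false_iff]
        refine ⟨⟨⟨⟨?_, ?_⟩, ?_⟩, ?_⟩, ?_⟩
        · simp only [decide_eq_false_iff_not, not_lt]
          omega
        · simp only [decide_eq_false_iff_not, not_lt]
          omega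
        · simp only [decide_eq_false_iff_not, not_le]
          push_cast
          omega
        · simp only [decide_eq_false_iff_not, not_le]
          push_cast
          omega
        · simp only [beq_eq_false_iff_ne, ne_eq]
          exact h a ha b hb hcell
      · simp only [PySem.List.pyGetD_natCast, beq_iff_eq]
        exact hcell
    · rw [if_neg]
      simp only [PySem.List.pyGetD_natCast, beq_iff_eq]
      exact hcell


theorem pv_placeShape_eq (board shape : List (List Int)) (iN jN : Nat) :
    pvPlaceShape board shape (iN : Int) (jN : Int) = pvPlaceN board shape iN jN := by
  unfold pvPlaceShape pvPlaceN
  simp only [PySem.List.pyGetD_zero, PySem.List.pyRange_zero_natCast, List.foldl_map]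
  apply PySem.List.foldl_congr_mem
  intro nb a ha
  unfold pvInnerF
  apply PySem.List.foldl_congr_mem
  intro nb' b hb
  unfold pvStepB pvSet2 pvShapeAt
  have e1 : ((iN : Int) + (a : Int)) = ((iN + a : Nat) : Int) := by push_cast; ring
  have e2 : ((jN : Int) + (b : Int)) = ((jN + b : Nat) : Int) := by push_cast; ring
  rw [e1, e2]
  simp only [PySem.List.pyGetD_natCast, PySem.List.pySetD_natCast]

theorem pv_countA (sim : List (List Int)) :
    pvCountFullLines sim =
      ((sim.countP (fun row => row.all (fun cell => cell == 1)) : Nat) : Int)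
      + (((List.range (sim.getD 0 []).length).countP
          (fun c => (List.range sim.length).all (fun r => pvAt sim r c == 1)) : Nat) : Int) := by
  unfold pvCountFullLines
  dsimp only
  congr 1
  · rw [PySem.List.sum_map_ite_one_zero]
  · rw [PySem.List.pyGetD_zero]
    simp only [PySem.List.pyRange_zero_natCast, List.map_map, Function.comp_def]
    rw [PySem.List.sum_map_ite_one_zero]
    congr 1
    apply pv_countP_congr
    intro c _
    rw [List.all_map]
    simp only [Function.comp_def, PySem.List.pyGetD_natCast]
    rfl

theorem pv_fitB_iff (board shape : List (List Int)) (iN jN : Nat) :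
    (((PySem.List.pyRange 0 (shape.length : Int) 1).flatMap
        (fun a => ((PySem.List.pyRange 0 ((PySem.List.pyGetD shape 0 []).length : Int) 1).filter
            (fun b => PySem.List.pyGetD (PySem.List.pyGetD shape a []) b 0 == 1)).map
          (fun b => (a, b)))).all
      (fun ab => !(PySem.List.pyGetD (PySem.List.pyGetD board ((iN : Int) + ab.1) [])
          ((jN : Int) + ab.2) 0 == 1)) = true) ↔
      (∀ a, a < shape.length → ∀ b, b < (shape.getD 0 []).length →
        pvShapeAt shape a b = 1 → ¬ pvAt board (iN + a) (jN + b) = 1) := by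
  rw [List.all_eq_true]
  constructor
  · intro h a ha b hb hcell hat
    have hmem : ((a : Int), (b : Int)) ∈ (PySem.List.pyRange 0 (shape.length : Int) 1).flatMap
        (fun a => ((PySem.List.pyRange 0 ((PySem.List.pyGetD shape 0 []).length : Int) 1).filter
            (fun b => PySem.List.pyGetD (PySem.List.pyGetD shape a []) b 0 == 1)).map
          (fun b => (a, b))) := by
      simp only [List.mem_flatMap, List.mem_map, List.mem_filter]
      refine ⟨(a : Int), ?_, (b : Int), ⟨?_, ?_⟩, rfl⟩
      · rw [PySem.List.mem_pyRange_one]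
        omega
      · rw [PySem.List.mem_pyRange_one, PySem.List.pyGetD_zero]
        omega
      · simp only [PySem.List.pyGetD_natCast, beq_iff_eq]
        exact hcell
    have hthis := h _ hmem
    have e1 : ((iN : Int) + ((a : Int), (b : Int)).1) = ((iN + a : Nat) : Int) := by
      push_cast; ring
    have e2 : ((jN : Int) + ((a : Int), (b : Int)).2) = ((jN + b : Nat) : Int) := by
      push_cast; ring
    rw [e1, e2, PySem.List.pyGetD_natCast, PySem.List.pyGetD_natCast] at hthis
    simp only [Bool.not_eq_eq_eq_not, Bool.not_true, beq_eq_false_iff_ne, ne_eq] at hthis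
    exact hthis hat
  · intro h ab hab
    simp only [List.mem_flatMap, List.mem_map, List.mem_filter] at hab
    obtain ⟨ia, hia, ib, ⟨hib, hcell⟩, rfl⟩ := hab
    rw [PySem.List.mem_pyRange_one] at hia
    rw [PySem.List.mem_pyRange_one, PySem.List.pyGetD_zero] at hib
    obtain ⟨ia0, rfl⟩ := Int.eq_ofNat_of_zero_le hia.1
    obtain ⟨ib0, rfl⟩ := Int.eq_ofNat_of_zero_le hib.1
    have ha : ia0 < shape.length := by exact_mod_cast hia.2
    have hbb : ib0 < (shape.getD 0 []).length := by exact_mod_cast hib.2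
    have e1 : ((iN : Int) + (((ia0 : Int), (ib0 : Int)).1)) = ((iN + ia0 : Nat) : Int) := by
      push_cast; ring
    have e2 : ((jN : Int) + (((ia0 : Int), (ib0 : Int)).2)) = ((jN + ib0 : Nat) : Int) := by
      push_cast; ring
    show (!(PySem.List.pyGetD (PySem.List.pyGetD board ((iN : Int) + ((ia0 : Int), (ib0 : Int)).1) [])
        ((jN : Int) + ((ia0 : Int), (ib0 : Int)).2) 0 == 1)) = true
    rw [e1, e2, PySem.List.pyGetD_natCast, PySem.List.pyGetD_natCast]
    simp only [Bool.not_eq_eq_eq_not, Bool.not_true, beq_eq_false_iff_ne, ne_eq]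
    apply h ia0 ha ib0 hbb
    simp only [PySem.List.pyGetD_natCast, beq_iff_eq] at hcell
    exact hcell

def pvScoreN (board shape : List (List Int)) (iN jN : Nat) : Int :=
  ((((List.range board.length).countP
      (fun r => pvFillR board r == (board.getD 0 []).length) : Nat) : Int)
  + (((List.range (board.getD 0 []).length).countP
      (fun c => pvFillC board c == board.length) : Nat) : Int))
  + (((List.range shape.length).countP
      (fun a => decide (0 < pvAddR shape a) &&
        (pvFillR board (iN + a) + pvAddR shape a == (board.getD 0 []).length)) : Nat) : Int)
  + (((List.range (shape.getD 0 []).length).countP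
      (fun b => decide (0 < pvAddC shape b) &&
        (pvFillC board (jN + b) + pvAddC shape b == board.length)) : Nat) : Int)

theorem pv_scoreA_eq (board shape : List (List Int)) (iN jN : Nat)
    (hrows : ∀ r', r' < board.length → (board.getD r' []).length = (board.getD 0 []).length)
    (hsrows : ∀ a, a < shape.length → (shape.getD a []).length = (shape.getD 0 []).length)
    (hi : iN + shape.length ≤ board.length)
    (hj : jN + (shape.getD 0 []).length ≤ (board.getD 0 []).length)
    (hfit : ∀ a, a < shape.length → ∀ b, b < (shape.getD 0 []).length →
      pvShapeAt shape a b = 1 → ¬ pvAt board (iN + a) (jN + b) = 1) :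
    pvCountFullLines (pvPlaceShape board shape (iN : Int) (jN : Int))
      = pvScoreN board shape iN jN := by
  rw [pv_placeShape_eq, pv_countA]
  have hdims := pvPlaceN_dims board shape iN jN
  rw [hdims.2 0, hdims.1]
  have hr1 : (pvPlaceN board shape iN jN).countP (fun row => row.all (fun cell => cell == 1))
      = (List.range board.length).countP
          (fun r => (List.range (board.getD 0 []).length).all
            (fun c => pvAt (pvPlaceN board shape iN jN) r c == 1)) := by
    rw [pv_countP_getD_range (pvPlaceN board shape iN jN) _ [], hdims.1]
    apply pv_countP_congr
    intro r hr
    rw [pv_all_getD_range ((pvPlaceN board shape iN jN).getD r []) _ 0, hdims.2 r,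
      hrows r (List.mem_range.mp hr)]
    rfl
  rw [hr1, pv_rows_after board shape iN jN _ hrows hsrows hi hj hfit,
    pv_cols_after board shape iN jN _ hrows hi hj hfit]
  unfold pvScoreN
  push_cast
  ring

theorem pv_getD_range (n b : Nat) (h : b < n) : (List.range n).getD b 0 = b := by
  rw [List.getD_eq_getElem _ _ (by simpa using h)]
  simp

theorem pv_scoreB_eq (board shape : List (List Int)) (iN jN : Nat)
    (hi : iN + shape.length ≤ board.length)
    (hj : jN + (shape.getD 0 []).length ≤ (board.getD 0 []).length) :
    ((((board.map (fun row => ((row.countP (fun x => x == 1) : Nat) : Int))).countP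
         (fun f => f == ((PySem.List.pyGetD board 0 []).length : Int)) : Nat) : Int)
      + ((((PySem.List.pyRange 0 ((PySem.List.pyGetD board 0 []).length : Int) 1).map
            (fun c => ((board.countP (fun row => PySem.List.pyGetD row c 0 == 1) : Nat) : Int))).countP
          (fun f => f == (board.length : Int)) : Nat) : Int))
      + (((PySem.List.pyRange 0 (shape.length : Int) 1).countP
          (fun a => decide (PySem.List.pyGetD (shape.map (fun srow => ((srow.countP (fun x => x == 1) : Nat) : Int))) a 0 > 0) &&
            (PySem.List.pyGetD (board.map (fun row => ((row.countP (fun x => x == 1) : Nat) : Int))) ((iN : Int) + a) 0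
              + PySem.List.pyGetD (shape.map (fun srow => ((srow.countP (fun x => x == 1) : Nat) : Int))) a 0
              == ((PySem.List.pyGetD board 0 []).length : Int))) : Nat) : Int)
      + (((PySem.List.pyRange 0 ((PySem.List.pyGetD shape 0 []).length : Int) 1).countP
          (fun b => decide (PySem.List.pyGetD ((PySem.List.pyRange 0 ((PySem.List.pyGetD shape 0 []).length : Int) 1).map
                (fun b => ((shape.countP (fun srow => PySem.List.pyGetD srow b 0 == 1) : Nat) : Int))) b 0 > 0) &&
            (PySem.List.pyGetD ((PySem.List.pyRange 0 ((PySem.List.pyGetD board 0 []).length : Int) 1).map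
                (fun c => ((board.countP (fun row => PySem.List.pyGetD row c 0 == 1) : Nat) : Int))) ((jN : Int) + b) 0
              + PySem.List.pyGetD ((PySem.List.pyRange 0 ((PySem.List.pyGetD shape 0 []).length : Int) 1).map
                (fun b => ((shape.countP (fun srow => PySem.List.pyGetD srow b 0 == 1) : Nat) : Int))) b 0
              == (board.length : Int))) : Nat) : Int)
    = pvScoreN board shape iN jN 
:= by
  have h1 : ((board.map (fun row => ((row.countP (fun x => x == 1) : Nat) : Int))).countP
      (fun f => f == ((PySem.List.pyGetD board 0 []).length : Int)))
      = (List.range board.length).countP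
          (fun r => pvFillR board r == (board.getD 0 []).length) := by
    rw [List.countP_map, pv_countP_getD_range board _ []]
    apply pv_countP_congr
    intro r hr
    simp only [Function.comp_apply, PySem.List.pyGetD_zero]
    apply Bool.coe_iff_coe.mp
    simp [pvFillR, beq_iff_eq]
  have h2 : (((PySem.List.pyRange 0 ((PySem.List.pyGetD board 0 []).length : Int) 1).map
        (fun c => ((board.countP (fun row => PySem.List.pyGetD row c 0 == 1) : Nat) : Int))).countP
      (fun f => f == (board.length : Int)))
      = (List.range (board.getD 0 []).length).countP
          (fun c => pvFillC board c == board.length) := by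
    rw [PySem.List.pyGetD_zero, PySem.List.pyRange_zero_natCast, List.map_map, List.countP_map]
    apply pv_countP_congr
    intro c hc
    simp only [Function.comp_apply]
    apply Bool.coe_iff_coe.mp
    simp [pvFillC, PySem.List.pyGetD_natCast, beq_iff_eq]
  have h3 : ((PySem.List.pyRange 0 (shape.length : Int) 1).countP
      (fun a => decide (PySem.List.pyGetD (shape.map (fun srow => ((srow.countP (fun x => x == 1) : Nat) : Int))) a 0 > 0) &&
        (PySem.List.pyGetD (board.map (fun row => ((row.countP (fun x => x == 1) : Nat) : Int))) ((iN : Int) + a) 0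
          + PySem.List.pyGetD (shape.map (fun srow => ((srow.countP (fun x => x == 1) : Nat) : Int))) a 0
          == ((PySem.List.pyGetD board 0 []).length : Int))))
      = (List.range shape.length).countP
          (fun a => decide (0 < pvAddR shape a) &&
            (pvFillR board (iN + a) + pvAddR shape a == (board.getD 0 []).length)) := by
    rw [PySem.List.pyRange_zero_natCast, List.countP_map]
    apply pv_countP_congr
    intro a ha
    have ha' : a < shape.length := List.mem_range.mp ha
    have e1 : ((iN : Int) + (a : Int)) = ((iN + a : Nat) : Int) := by push_cast; ring
    simp only [Function.comp_apply, e1, PySem.List.pyGetD_natCast, PySem.List.pyGetD_zero]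
    rw [pv_getD_map shape _ a 0 [] ha', pv_getD_map board _ (iN + a) 0 [] (by omega)]
    apply Bool.coe_iff_coe.mp
    simp only [Bool.and_eq_true, decide_eq_true_eq, beq_iff_eq, pvAddR, pvFillR]
    constructor
    · rintro ⟨ha1, ha2⟩
      exact ⟨by exact_mod_cast ha1, by exact_mod_cast ha2⟩
    · rintro ⟨ha1, ha2⟩
      exact ⟨by exact_mod_cast ha1, by exact_mod_cast ha2⟩
  have h4 : ((PySem.List.pyRange 0 ((PySem.List.pyGetD shape 0 []).length : Int) 1).countP
      (fun b => decide (PySem.List.pyGetD ((PySem.List.pyRange 0 ((PySem.List.pyGetD shape 0 []).length : Int) 1).map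
            (fun b => ((shape.countP (fun srow => PySem.List.pyGetD srow b 0 == 1) : Nat) : Int))) b 0 > 0) &&
        (PySem.List.pyGetD ((PySem.List.pyRange 0 ((PySem.List.pyGetD board 0 []).length : Int) 1).map
            (fun c => ((board.countP (fun row => PySem.List.pyGetD row c 0 == 1) : Nat) : Int))) ((jN : Int) + b) 0
          + PySem.List.pyGetD ((PySem.List.pyRange 0 ((PySem.List.pyGetD shape 0 []).length : Int) 1).map
            (fun b => ((shape.countP (fun srow => PySem.List.pyGetD srow b 0 == 1) : Nat) : Int))) b 0
          == (board.length : Int))))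
      = (List.range (shape.getD 0 []).length).countP
          (fun b => decide (0 < pvAddC shape b) &&
            (pvFillC board (jN + b) + pvAddC shape b == board.length)) := by
    simp only [PySem.List.pyGetD_zero, PySem.List.pyRange_zero_natCast, List.map_map]
    rw [List.countP_map]
    apply pv_countP_congr
    intro b hb
    have hb' : b < (shape.getD 0 []).length := List.mem_range.mp hb
    have e2 : ((jN : Int) + (b : Int)) = ((jN + b : Nat) : Int) := by push_cast; ring
    simp only [Function.comp_apply, e2, PySem.List.pyGetD_natCast]
    rw [pv_getD_map (List.range (shape.getD 0 []).length) _ b 0 0 (by rw [List.length_range]; omega),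
      pv_getD_map (List.range (board.getD 0 []).length) _ (jN + b) 0 0 (by rw [List.length_range]; omega),
      pv_getD_range _ b hb', pv_getD_range _ (jN + b) (by omega)]
    apply Bool.coe_iff_coe.mp
    simp only [Function.comp_apply, Bool.and_eq_true, decide_eq_true_eq, beq_iff_eq,
      pvAddC, pvFillC, PySem.List.pyGetD_natCast]
    constructor
    · rintro ⟨hb1, hb2⟩
      exact ⟨by exact_mod_cast hb1, by exact_mod_cast hb2⟩
    · rintro ⟨hb1, hb2⟩
      exact ⟨by exact_mod_cast hb1, by exact_mod_cast hb2⟩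
  rw [h1, h2, h3, h4]
  rfl

-- ===== VERDICT (by name: the statement is the Claim_ definition above) =====
theorem find_best_placement_spec : Claim_equal_find_best_placement := by
  intro board shape _ hpre
  unfold Spec_find_best_placement
  obtain ⟨hb, hs, hdisj⟩ := hpre
  have h00 : board.headD [] = board.getD 0 [] := by
    cases board with
    | nil => exact absurd rfl hb
    | cons x t => rfl
  have hs00 : shape.headD [] = shape.getD 0 [] := by
    cases shape with
    | nil => exact absurd rfl hs
    | cons x t => rfl
  unfold find_best_placement find_best_placement_alt
  dsimp only
  by_cases hg : ((board.length : Int) - (shape.length : Int) + 1 ≤ 0)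
      ∨ (((PySem.List.pyGetD board 0 []).length : Int)
          - ((PySem.List.pyGetD shape 0 []).length : Int) + 1 ≤ 0)
  · rw [if_pos hg]
    rcases hg with hg1 | hg2
    · rw [PySem.List.pyRange_one_eq_nil
        (show (board.length : Int) - (shape.length : Int) + 1 ≤ 0 from hg1)]
      rfl
    · rw [PySem.List.pyRange_one_eq_nil
        (show ((PySem.List.pyGetD board 0 []).length : Int)
          - ((PySem.List.pyGetD shape 0 []).length : Int) + 1 ≤ 0 from hg2)]
      simp only [List.foldl_nil]
      exact PySem.List.foldl_ignore ..
  · rw [if_neg hg]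
    rw [PySem.List.pyGetD_zero, PySem.List.pyGetD_zero, ← h00, ← hs00] at hg
    have hrect : (∀ row ∈ board, row.length = (board.headD []).length) ∧
        (∀ srow ∈ shape, srow.length = (shape.headD []).length) := by
      rcases hdisj with h1 | h2 | hr
      · exact absurd (Or.inl (by omega)) hg
      · exact absurd (Or.inr (by omega)) hg
      · exact hr
    have hrows : ∀ r', r' < board.length → (board.getD r' []).length = (board.getD 0 []).length := by
      intro r' hr'
      rw [← h00, List.getD_eq_getElem _ _ hr']
      exact hrect.1 _ (List.getElem_mem hr')
    have hsrows : ∀ a, a < shape.length → (shape.getD a []).length = (shape.getD 0 []).length := by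
      intro a ha
      rw [← hs00, List.getD_eq_getElem _ _ ha]
      exact hrect.2 _ (List.getElem_mem ha)
    apply PySem.List.foldl_congr_mem
    intro st i hi'
    apply PySem.List.foldl_congr_mem
    intro st' j hj'
    rw [PySem.List.mem_pyRange_one] at hi' hj'
    rw [PySem.List.pyGetD_zero, PySem.List.pyGetD_zero] at hj'
    obtain ⟨iN, rfl⟩ := Int.eq_ofNat_of_zero_le hi'.1
    obtain ⟨jN, rfl⟩ := Int.eq_ofNat_of_zero_le hj'.1
    have hiB : iN + shape.length ≤ board.length := by
      have := hi'.2
      omega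
    have hjB : jN + (shape.getD 0 []).length ≤ (board.getD 0 []).length := by
      have := hj'.2
      omega
    by_cases hf : (∀ a, a < shape.length → ∀ b, b < (shape.getD 0 []).length →
        pvShapeAt shape a b = 1 → ¬ pvAt board (iN + a) (jN + b) = 1)
    · rw [if_pos ((pv_fitA_iff board shape iN jN hiB hjB).mpr hf),
        if_pos ((pv_fitB_iff board shape iN jN).mpr hf)]
      rw [pv_scoreA_eq board shape iN jN hrows hsrows hiB hjB hf,
        pv_scoreB_eq board shape iN jN hiB hjB]
    · rw [if_neg (fun hc => hf ((pv_fitA_iff board shape iN jN hiB hjB).mp hc)),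
        if_neg (fun hc => hf ((pv_fitB_iff board shape iN jN).mp hc))]
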